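-- pv_equiv track=rewrite | github.com/SukhOberoi/advent-of-code | day 12/day12part1.py | checkblocks
-- ===== SOURCE A (Python) =====
-- def checkblocks(row, blocks):
--     testblock=[]
--     count=0
--     for char in row:
--         if char == "#":
--             count+=1
--         elif count != 0:
--             testblock.append(count)
--             count=0
--     if count:
--         testblock.append(count)
--     if testblock==blocks:
--         return 1
--     else:
--         return 0
-- ===== SOURCE B (Python) =====
-- def checkblocks(row, blocks):
--     spaced = ''.join(c if c == '#' else ' ' for c in row)
--     return 1 if [len(run) for run in spaced.split()] == blocks else 0
-- ===== Notes on version B (the rewrite author's own statement) =====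
-- stated objective: idiomatic
-- what changed: B maps every non-'#' character to a space and reads the '#'-run lengths off str.split(), replacing A's carried count variable, elif-flush branch and post-loop flush with one library tokenization.
import Mathlib
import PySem

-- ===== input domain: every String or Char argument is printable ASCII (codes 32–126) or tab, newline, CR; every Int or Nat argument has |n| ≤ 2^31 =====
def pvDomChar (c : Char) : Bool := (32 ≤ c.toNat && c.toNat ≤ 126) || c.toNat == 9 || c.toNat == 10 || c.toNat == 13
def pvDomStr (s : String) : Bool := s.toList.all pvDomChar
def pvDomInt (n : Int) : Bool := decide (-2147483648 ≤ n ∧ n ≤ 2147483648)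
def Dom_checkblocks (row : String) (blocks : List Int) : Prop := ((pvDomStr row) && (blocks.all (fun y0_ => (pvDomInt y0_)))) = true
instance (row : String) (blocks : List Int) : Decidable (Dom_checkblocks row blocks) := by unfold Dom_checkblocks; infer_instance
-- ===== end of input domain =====

-- B replaces A's count-accumulator/flush loop with a space-substitution plus str.split() tokenization (idiomatic; same cost).

-- ===== PORT A =====
-- A's loop over row carrying (testblock, count), flushing count on a non-'#' char and after the loop.
def checkblocks (row : String) (blocks : List Int) : Int :=
  let st := row.toList.foldl
    (fun (st : List Int × Int) c =>
      if c = '#' then (st.1, st.2 + 1)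
      else if st.2 ≠ 0 then (st.1 ++ [st.2], (0 : Int)) else st)
    ([], 0)
  let testblock := if st.2 ≠ 0 then st.1 ++ [st.2] else st.1
  if testblock = blocks then 1 else 0

-- ===== PORT B =====
-- ''.join of the per-char map is the char-list map; str.split() is PySem.Chars.split₀ (exact on this domain);
-- len(run) is the word's length.
def checkblocks_alt (row : String) (blocks : List Int) : Int :=
  let spaced : List Char := row.toList.map (fun c => if c = '#' then c else ' ')
  if (PySem.Chars.split₀ spaced).map (fun w => (w.length : Int)) = blocks then 1 else 0

-- ===== PRECONDITION & SPEC =====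
def Spec_checkblocks (row : String) (blocks : List Int) (out : Int) : Prop := out = checkblocks_alt row blocks
instance (row : String) (blocks : List Int) (out : Int) : Decidable (Spec_checkblocks row blocks out) := by unfold Spec_checkblocks; infer_instance

-- ===== CLAIM (what is proved, stated in full; the proofs are below) =====
def Claim_equal_checkblocks : Prop := ∀ (row : String) (blocks : List Int), Dom_checkblocks row blocks → Spec_checkblocks row blocks (checkblocks row blocks)

-- ===== LEMMAS AND PROOFS =====

-- A's flushed fold state equals the word lengths produced by split₀.go, for any partial word cur / word stack acc.
theorem pv_key (l : List Char) (cur : List Char) (acc : List (List Char)) :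
    (let st := l.foldl
        (fun (st : List Int × Int) c =>
          if c = '#' then (st.1, st.2 + 1)
          else if st.2 ≠ 0 then (st.1 ++ [st.2], (0 : Int)) else st)
        (acc.reverse.map (fun w => (w.length : Int)), (cur.length : Int));
      if st.2 ≠ 0 then st.1 ++ [st.2] else st.1)
    = (PySem.Chars.split₀.go (l.map (fun c => if c = '#' then c else ' ')) cur acc).map
        (fun w => (w.length : Int)) := by
  induction l generalizing cur acc with
  | nil =>
    simp only [List.foldl_nil, List.map_nil, PySem.Chars.split₀.go]
    by_cases h : cur = []
    · subst h; simp
    · have h1 : cur.isEmpty = false := by simpa [List.isEmpty_iff] using h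
      have h2 : ((cur.length : Int) ≠ 0) := by
        simpa using (List.length_pos_iff.mpr h).ne'
      simp [h1, h]
  | cons c rest ih =>
    by_cases hc : c = '#'
    · subst hc
      have hs : PySem.Chars.isspace '#' = false := by decide
      simp only [List.foldl_cons, List.map_cons, PySem.Chars.split₀.go]
      have := ih ('#' :: cur) acc
      simpa [List.length_cons] using this
    · have hs : PySem.Chars.isspace ' ' = true := by decide
      by_cases h : cur = []
      · subst h
        simp only [List.foldl_cons, List.map_cons, if_neg hc, PySem.Chars.split₀.go, hs]
        simpa using ih [] acc
      · have h1 : cur.isEmpty = false := by simpa [List.isEmpty_iff] using h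
        have h2 : ((cur.length : Int) ≠ 0) := by
          simpa using (List.length_pos_iff.mpr h).ne'
        simp only [List.foldl_cons, List.map_cons, if_neg hc, PySem.Chars.split₀.go, hs, h1,
          if_true, if_false, Bool.false_eq_true]
        have := ih [] (cur.reverse :: acc)
        simpa [List.map_append, h] using this

-- ===== VERDICT (by name: the statement is the Claim_ definition above) =====
theorem checkblocks_spec : Claim_equal_checkblocks := by
  intro row blocks _
  unfold Spec_checkblocks checkblocks checkblocks_alt PySem.Chars.split₀
  have := pv_key row.toList [] []
  simp only [List.reverse_nil, List.map_nil, List.length_nil, Nat.cast_zero] at this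
  simp only [this]
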